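-- pv_equiv track=rewrite | github.com/shreejitverma/SDE-Interview-Prep | Competitive Programming/Trie/Print Unique rows in boolean matrix .py | uniqueRow
-- ===== SOURCE A (Python) =====
-- def uniqueRow(row, col, matrix):
--     # complete the function
--     # complete the function
--     ans = []
--     hash_set = set()
--     i = 0
--     while i < (row*col):
--         row_st = ''
--         for j in range(i, i+col):
--             row_st += matrix[j]
--
--         if row_st not in hash_set:
--             rows = []
--             hash_set.add(row_st)
--             for j in range(i, i+col):
--                 rows.append(matrix[j])
--             ans.append(rows)
--         i += col
--     return ans
-- ===== SOURCE B (Python) =====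
-- def uniqueRow(row, col, matrix):
--     if col <= 0:
--         return []
--     seen = set()
--     out = []
--     for i in range(0, row * col, col):
--         chunk = matrix[i:i + col]
--         if ''.join(chunk) not in seen:
--             seen.add(''.join(chunk))
--             out.append(chunk)
--     return out
-- ===== Notes on version B (the rewrite author's own statement) =====
-- stated objective: idiomatic
-- what changed: Replaces A's manual while-loop with two inner per-cell index loops (string += concatenation and element-by-element row rebuilding) by a single for-loop over range(0, row*col, col) that slices each row out once and dedups it by a ''.join key in a set.
import Mathlib
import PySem

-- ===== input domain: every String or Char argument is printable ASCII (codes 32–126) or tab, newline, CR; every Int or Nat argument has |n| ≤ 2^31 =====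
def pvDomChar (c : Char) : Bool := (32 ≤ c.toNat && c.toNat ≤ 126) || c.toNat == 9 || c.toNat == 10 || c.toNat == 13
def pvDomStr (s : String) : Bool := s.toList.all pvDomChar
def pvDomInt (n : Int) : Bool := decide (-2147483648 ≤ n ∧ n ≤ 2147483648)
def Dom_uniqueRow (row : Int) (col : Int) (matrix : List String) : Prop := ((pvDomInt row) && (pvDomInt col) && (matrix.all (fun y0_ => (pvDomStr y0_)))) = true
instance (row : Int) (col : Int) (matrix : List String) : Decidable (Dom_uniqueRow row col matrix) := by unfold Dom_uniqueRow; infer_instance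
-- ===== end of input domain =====

-- B replaces A's manual while-loop with per-cell index loops by a single range(0, row*col, col)
-- pass over row slices with a join key (idiomatic; same dedup-by-concatenation behaviour).

-- ===== PORT A =====
-- row_st: the inner 'for j in range(i, i+col): row_st += matrix[j]' (strings modelled as List Char)
def uniqueRowRowSt (col : Int) (matrix : List String) (i : Int) : List Char :=
  (PySem.List.pyRange i (i + col) 1).foldl
    (fun acc j => acc ++ (PySem.List.pyGetD matrix j "").toList) []

-- rows: the inner 'for j in range(i, i+col): rows.append(matrix[j])'
def uniqueRowRows (col : Int) (matrix : List String) (i : Int) : List String :=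
  (PySem.List.pyRange i (i + col) 1).foldl
    (fun acc j => acc ++ [PySem.List.pyGetD matrix j ""]) []

-- the while loop; fuel only makes it total (enough fuel is supplied below; Pre_ rules out divergence)
def uniqueRowLoop (row : Int) (col : Int) (matrix : List String) :
    Nat → Int → PySem.Set (List Char) → List (List String) → List (List String)
  | 0, _, _, ans => ans
  | fuel + 1, i, hash_set, ans =>
    if i < row * col then
      let row_st := uniqueRowRowSt col matrix i
      if PySem.Set.contains hash_set row_st then
        uniqueRowLoop row col matrix fuel (i + col) hash_set ans
      else
        uniqueRowLoop row col matrix fuel (i + col) (PySem.Set.add hash_set row_st)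
          (ans ++ [uniqueRowRows col matrix i])
    else ans

def uniqueRow (row : Int) (col : Int) (matrix : List String) : List (List String) :=
  uniqueRowLoop row col matrix ((row * col).toNat + 1) 0 PySem.Set.empty []

-- ===== PORT B =====
-- one iteration of B's for-loop: slice the row out, key = ''.join(chunk)
def uniqueRowAltStep (col : Int) (matrix : List String)
    (st : PySem.Set (List Char) × List (List String)) (i : Int) :
    PySem.Set (List Char) × List (List String) :=
  let chunk := PySem.List.slice matrix (some i) (some (i + col))
  if PySem.Set.contains st.1 (chunk.flatMap String.toList) then st
  else (PySem.Set.add st.1 (chunk.flatMap String.toList), st.2 ++ [chunk])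

def uniqueRow_alt (row : Int) (col : Int) (matrix : List String) : List (List String) :=
  if col ≤ 0 then []
  else ((PySem.List.pyRange 0 (row * col) col).foldl (uniqueRowAltStep col matrix)
          (PySem.Set.empty, [])).2

-- ===== PRECONDITION & SPEC =====
-- Pre_ is exactly where the Python A returns: otherwise it raises IndexError
-- (col > 0 and row*col > len(matrix)) or loops forever (col < 0 with row*col > 0).
def Pre_uniqueRow (row : Int) (col : Int) (matrix : List String) : Prop :=
  row * col ≤ 0 ∨ (0 < col ∧ row * col ≤ (matrix.length : Int))
instance (row : Int) (col : Int) (matrix : List String) : Decidable (Pre_uniqueRow row col matrix) := by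
  unfold Pre_uniqueRow; infer_instance

def pvWitness_uniqueRow : Int × Int × List String := (2, 2, ["1", "0", "1", "0"])

def Spec_uniqueRow (row : Int) (col : Int) (matrix : List String) (out : List (List String)) : Prop := out = uniqueRow_alt row col matrix
instance (row : Int) (col : Int) (matrix : List String) (out : List (List String)) : Decidable (Spec_uniqueRow row col matrix out) := by unfold Spec_uniqueRow; infer_instance

-- ===== CLAIM (what is proved, stated in full; the proofs are below) =====
def Claim_equal_uniqueRow : Prop := ∀ (row : Int) (col : Int) (matrix : List String), Dom_uniqueRow row col matrix → Pre_uniqueRow row col matrix → Spec_uniqueRow row col matrix (uniqueRow row col matrix)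

-- ===== LEMMAS AND PROOFS =====

-- range(a, b, s) with positive step s and b ≤ a is empty
theorem pyRangePosNil (a b s : Int) (hs : 0 < s) (h : b ≤ a) :
    PySem.List.pyRange a b s = [] := by
  rw [PySem.List.pyRange_of_pos _ _ hs, if_neg (by omega)]
  simp

-- range(a, a + s*m, s) with positive step peels off its head a
theorem pyRangePosCons (a s m : Int) (hs : 0 < s) (hm : 0 < m) :
    PySem.List.pyRange a (a + s * m) s = a :: PySem.List.pyRange (a + s) (a + s * m) s := by
  have hdiv : (a + s * m - a + s - 1) / s = m := by
    have h1 : a + s * m - a + s - 1 = (s - 1) + m * s := by ring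
    rw [h1, Int.add_mul_ediv_right _ _ (by omega : s ≠ 0),
      Int.ediv_eq_zero_of_lt (by omega) (by omega)]
    omega
  have hmn : m.toNat = (m.toNat - 1) + 1 := by omega
  rw [PySem.List.pyRange_of_pos _ _ hs, if_pos (by nlinarith : a < a + s * m), hdiv, hmn,
    List.range_succ_eq_map, List.map_cons, List.map_map,
    PySem.List.pyRange_of_pos _ _ hs]
  have hn' : (if a + s < a + s * m then ((a + s * m - (a + s) + s - 1) / s).toNat else 0) =
      m.toNat - 1 := by
    by_cases h1 : a + s < a + s * m
    · rw [if_pos h1]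
      have h2 : a + s * m - (a + s) + s - 1 = (s - 1) + (m - 1) * s := by ring
      rw [h2, Int.add_mul_ediv_right _ _ (by omega : s ≠ 0),
        Int.ediv_eq_zero_of_lt (by omega) (by omega)]
      omega
    · rw [if_neg h1]
      have h2 : m ≤ 1 := by nlinarith
      omega
  rw [hn']
  simp only [List.cons.injEq]
  refine ⟨by simp, ?_⟩
  congr 1
  funext k
  simp only [Function.comp_apply, Nat.succ_eq_add_one]
  push_cast
  ring

-- under the bounds of Pre_, the index loop over matrix[i], i ∈ range(a, a+col), is the slice
theorem chunkEq (col : Int) (matrix : List String) (a : Int) (hc : 0 < col) (h0 : 0 ≤ a)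
    (hlen : a + col ≤ (matrix.length : Int)) :
    (PySem.List.pyRange a (a + col) 1).map (fun j => PySem.List.pyGetD matrix j "") =
      PySem.List.slice matrix (some a) (some (a + col)) := by
  rw [PySem.List.slice_of_nonneg matrix h0 (by omega) (by omega) hlen,
    PySem.List.pyRange_one, List.map_map]
  apply List.ext_getElem
  · simp; omega
  · intro k h1 h2
    simp only [List.getElem_map, List.getElem_range, Function.comp_apply]
    have hk : k < col.toNat := by simpa using h1
    rw [PySem.List.pyGetD_eq_getElem matrix "" (by omega) (by push_cast; omega),
      List.getElem_take, List.getElem_drop]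
    congr 1
    omega

theorem rowStEq (col : Int) (matrix : List String) (a : Int) (hc : 0 < col) (h0 : 0 ≤ a)
    (hlen : a + col ≤ (matrix.length : Int)) :
    uniqueRowRowSt col matrix a =
      (PySem.List.slice matrix (some a) (some (a + col))).flatMap String.toList := by
  rw [uniqueRowRowSt, PySem.List.foldl_append_eq_flatMap, List.nil_append,
    ← chunkEq col matrix a hc h0 hlen, List.flatMap_map]

theorem rowsEq (col : Int) (matrix : List String) (a : Int) (hc : 0 < col) (h0 : 0 ≤ a)
    (hlen : a + col ≤ (matrix.length : Int)) :
    uniqueRowRows col matrix a = PySem.List.slice matrix (some a) (some (a + col)) := by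
  rw [uniqueRowRows, PySem.List.foldl_append_singleton_eq_map, List.nil_append,
    chunkEq col matrix a hc h0 hlen]

-- the while loop is B's fold over range(a, row*col, col)
theorem loopEqFold (row col : Int) (matrix : List String) (hc : 0 < col)
    (hlen : row * col ≤ (matrix.length : Int)) :
    ∀ (n fuel : Nat) (a : Int) (hs : PySem.Set (List Char)) (ans : List (List String)),
      0 ≤ a → a + col * n = row * col → n ≤ fuel →
      uniqueRowLoop row col matrix fuel a hs ans =
        ((PySem.List.pyRange a (row * col) col).foldl (uniqueRowAltStep col matrix) (hs, ans)).2 := by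
  intro n
  induction n with
  | zero =>
    intro fuel a hs ans h0 hend _
    have ha : a = row * col := by push_cast at hend; omega
    rw [pyRangePosNil _ _ _ hc (by omega)]
    cases fuel with
    | zero => simp [uniqueRowLoop]
    | succ f => simp [uniqueRowLoop, if_neg (by omega : ¬ a < row * col)]
  | succ n ih =>
    intro fuel a hs ans h0 hend hfuel
    obtain ⟨f, rfl⟩ : ∃ f, fuel = f + 1 := ⟨fuel - 1, by omega⟩
    have hlt : a < row * col := by
      have : 0 < col * ((n : Int) + 1) := by positivity
      push_cast at hend; omega
    have hcolle : a + col ≤ row * col := by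
      have : col * 1 ≤ col * ((n : Int) + 1) := by
        apply mul_le_mul_of_nonneg_left _ (by omega)
        omega
      push_cast at hend ⊢; omega
    have hrange : PySem.List.pyRange a (row * col) col =
        a :: PySem.List.pyRange (a + col) (row * col) col := by
      have := pyRangePosCons a col ((n : Int) + 1) hc (by omega)
      rw [show a + col * ((n : Int) + 1) = row * col by push_cast at hend; omega] at this
      exact this
    have hkey := rowStEq col matrix a hc h0 (le_trans hcolle hlen)
    have hrows := rowsEq col matrix a hc h0 (le_trans hcolle hlen)
    rw [hrange, List.foldl_cons, uniqueRowLoop, if_pos hlt]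
    simp only [uniqueRowAltStep, hkey, hrows]
    have hstep : a + col + col * (n : Int) = row * col := by
      have hh : col * ((n : Int) + 1) = col * (n : Int) + col := by ring
      push_cast at hend
      omega
    by_cases hmem : PySem.Set.contains hs
        ((PySem.List.slice matrix (some a) (some (a + col))).flatMap String.toList) = true
    · rw [if_pos hmem, if_pos hmem]
      exact ih f (a + col) hs ans (by omega) (by push_cast; omega) (by omega)
    · rw [if_neg hmem, if_neg hmem]
      exact ih f (a + col) _ _ (by omega) (by push_cast; omega) (by omega)

-- ===== VERDICT (by name: the statement is the Claim_ definition above) =====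
theorem uniqueRow_spec : Claim_equal_uniqueRow := by
  intro row col matrix _ hpre
  unfold Spec_uniqueRow uniqueRow uniqueRow_alt
  by_cases htriv : row * col ≤ 0
  · have hA : uniqueRowLoop row col matrix ((row * col).toNat + 1) 0 PySem.Set.empty [] = [] := by
      have h1 : (row * col).toNat + 1 = 1 := by omega
      rw [h1]
      simp [uniqueRowLoop, if_neg (show ¬ (0:Int) < row * col by omega)]
    rw [hA]
    by_cases hc : col ≤ 0
    · rw [if_pos hc]
    · rw [if_neg hc, pyRangePosNil _ _ _ (by omega) htriv]
      simp
  · obtain ⟨hc, hlen⟩ : 0 < col ∧ row * col ≤ (matrix.length : Int) := by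
      rcases hpre with h | h
      · omega
      · exact h
    rw [if_neg (by omega)]
    have hrowpos : 0 < row := by
      by_contra h
      push_neg at h
      nlinarith
    apply loopEqFold row col matrix hc hlen row.toNat _ 0 _ _ le_rfl
    · rw [Int.toNat_of_nonneg (by omega : (0:Int) ≤ row)]
      ring
    · have hrc : row ≤ row * col := by
        nlinarith [mul_nonneg (le_of_lt hrowpos) (by omega : (0:Int) ≤ col - 1)]
      omega
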